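-- pv_equiv track=rewrite | github.com/JacquesVonHamsterviel/SIM800_AT_Python | functions/unicode.py | DecodeUnicode
-- ===== SOURCE A (Python) =====
-- def DecodeUnicode(str):
--     i=0
--     res=""
--     if len(str)%4==0 and len(str)>6: #unicode需要可以被4整除
--         if str.upper()==str: #全是大写字母才算短信的unicode，而且不能是纯数字
--              while i<len(str)/4:
--                  res=res+"\\u"+str[4*i:4*i+4].lower()
--                  i+=1
--              try:
--                  res=res.encode('utf-8').decode('unicode_escape')
--                  return(res)
--              except:
--                  return(str)
--         else:
--              return(str)
--     else:
--         return(str)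
-- ===== SOURCE B (Python) =====
-- _HEX = set("0123456789ABCDEF")
--
-- def DecodeUnicode(str):
--     if len(str) % 4 == 0 and len(str) > 6 and str.upper() == str:
--         chunks = [str[4 * i:4 * i + 4] for i in range(len(str) // 4)]
--         if all(c in _HEX for ch in chunks for c in ch):
--             return "".join(chr(int(ch, 16)) for ch in chunks)
--     return str
-- ===== Notes on version B (the rewrite author's own statement) =====
-- stated objective: idiomatic
-- what changed: B drops A's while-loop that concatenates a '\uXXXX' escape string and the encode/decode round-trip through the unicode_escape codec, and instead validates each 4-char chunk as uppercase hex and builds the result directly with chr(int(chunk,16)); Pre_ only excludes guard-passing all-hex inputs with a chunk in 0xD800-0xDFFF, where both programs return the SAME Python string containing lone UTF-16 surrogates, which is not representable as a Lean String (representability of the ports, not a behavioural difference).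
import Mathlib
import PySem

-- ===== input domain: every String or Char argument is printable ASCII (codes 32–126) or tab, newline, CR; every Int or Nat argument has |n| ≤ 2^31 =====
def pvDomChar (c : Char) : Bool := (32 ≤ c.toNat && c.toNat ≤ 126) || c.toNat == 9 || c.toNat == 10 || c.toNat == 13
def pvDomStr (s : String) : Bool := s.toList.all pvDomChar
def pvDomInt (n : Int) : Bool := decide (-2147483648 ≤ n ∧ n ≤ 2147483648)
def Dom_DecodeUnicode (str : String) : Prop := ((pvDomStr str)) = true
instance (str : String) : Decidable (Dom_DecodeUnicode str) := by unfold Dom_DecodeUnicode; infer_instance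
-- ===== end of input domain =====

-- B replaces A's escape-string building + unicode_escape codec round-trip by direct
-- per-chunk hex validation and chr(int(chunk,16)) (idiomatic; same asymptotic cost).


-- ===== PORT A =====
-- Hex digit of the unicode_escape codec's \uXXXX parser (it accepts both cases;
-- character ranges written on .toNat, exact for ASCII).
def ueHexVal? (c : Char) : Option Nat :=
  if 48 ≤ c.toNat ∧ c.toNat ≤ 57 then some (c.toNat - 48)
  else if 97 ≤ c.toNat ∧ c.toNat ≤ 102 then some (c.toNat - 87)
  else if 65 ≤ c.toNat ∧ c.toNat ≤ 70 then some (c.toNat - 55)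
  else none

-- Hand port of res.encode('utf-8').decode('unicode_escape') (no PySem primitive):
-- none = UnicodeDecodeError.  Exact on every string the loop below builds (ASCII;
-- every backslash there starts a "\uXXXX" block, so no other escape form can occur),
-- and Char.ofNat is exact for the non-surrogate code points Pre_ admits.
def ueDecode : List Char → Option (List Char)
  | [] => some []
  | '\\' :: 'u' :: a :: b :: c :: d :: rest =>
      match ueHexVal? a, ueHexVal? b, ueHexVal? c, ueHexVal? d with
      | some x, some y, some z, some w =>
          (ueDecode rest).map (fun t => Char.ofNat (4096 * x + 256 * y + 16 * z + w) :: t)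
      | _, _, _, _ => none
  | '\\' :: _ => none
  | ch :: rest => (ueDecode rest).map (fun t => ch :: t)

-- while i < len(str)/4: res = res + "\u" + str[4*i:4*i+4].lower(); i += 1
-- (Python's condition is true division; the loop is only reached when len % 4 == 0,
-- where it coincides with this Nat division.)
def ueLoop (s : List Char) (i : Nat) (res : List Char) : List Char :=
  if i < s.length / 4 then
    ueLoop s (i + 1)
      (res ++ '\\' :: 'u' ::
        PySem.Chars.lower (PySem.List.slice s (some (4 * (i : Int))) (some (4 * (i : Int) + 4))))
  else res
termination_by s.length / 4 - i

def DecodeUnicode (str : String) : String :=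
  let s := str.toList
  if s.length % 4 = 0 ∧ s.length > 6 then
    if PySem.Chars.upper s = s then
      match ueDecode (ueLoop s 0 []) with
      | some out => String.ofList out
      | none => str
    else str
  else str

-- ===== PORT B =====
-- c ∈ "0123456789ABCDEF" (ranges on .toNat, exact for ASCII)
def bHexDigit (c : Char) : Bool := (48 ≤ c.toNat && c.toNat ≤ 57) || (65 ≤ c.toNat && c.toNat ≤ 70)

def bHexDigitVal (c : Char) : Nat := if c.toNat ≤ 57 then c.toNat - 48 else c.toNat - 55

-- int(ch, 16); Source B only calls it on nonempty all-uppercase-hex chunks, where this fold is exact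
def bChunkVal (ch : List Char) : Nat := ch.foldl (fun a c => 16 * a + bHexDigitVal c) 0

def DecodeUnicode_alt (str : String) : String :=
  let s := str.toList
  if s.length % 4 = 0 ∧ s.length > 6 ∧ PySem.Chars.upper s = s then
    let chunks := (List.range (s.length / 4)).map
      (fun i : Nat => PySem.List.slice s (some (4 * (i : Int))) (some (4 * (i : Int) + 4)))
    if chunks.all (fun ch => ch.all bHexDigit) then
      String.ofList (chunks.map (fun ch => Char.ofNat (bChunkVal ch)))
    else str
  else str

-- ===== PRECONDITION & SPEC =====
-- Pre_ excludes exactly the guard-passing all-hex inputs having a 4-digit chunk in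
-- 0xD800–0xDFFF: there the (identical) Python outputs of A and B contain lone UTF-16
-- surrogates, which a Lean String cannot represent — an exclusion for representability
-- of the ports, not a behavioural difference (the Lean proof of A = B never needs it).
def Pre_DecodeUnicode (str : String) : Prop :=
  let s := str.toList
  (s.length % 4 = 0 ∧ s.length > 6 ∧ PySem.Chars.upper s = s) →
    ∀ i ∈ List.range (s.length / 4),
      ((s.drop (4 * i)).take 4).all bHexDigit = true →
        bChunkVal ((s.drop (4 * i)).take 4) < 0xD800 ∨ 0xDFFF < bChunkVal ((s.drop (4 * i)).take 4)

instance (str : String) : Decidable (Pre_DecodeUnicode str) := by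
  unfold Pre_DecodeUnicode; infer_instance

def pvWitness_DecodeUnicode : String := "0041004200430044"

def Spec_DecodeUnicode (str : String) (out : String) : Prop := out = DecodeUnicode_alt str
instance (str : String) (out : String) : Decidable (Spec_DecodeUnicode str out) := by
  unfold Spec_DecodeUnicode; infer_instance

-- ===== CLAIM (what is proved, stated in full; the proofs are below) =====
def Claim_equal_DecodeUnicode : Prop :=
  ∀ (str : String), Dom_DecodeUnicode str → Pre_DecodeUnicode str →
    Spec_DecodeUnicode str (DecodeUnicode str)

-- ===== LEMMAS AND PROOFS =====
theorem char_le_iff (c d : Char) : (c ≤ d) ↔ (c.toNat ≤ d.toNat) := by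
  rw [Char.le_def]; exact UInt32.le_iff_toNat_le

theorem toNat_ofNat_small (n : Nat) (h : n < 55296) : (Char.ofNat n).toNat = n := by
  unfold Char.ofNat
  rw [dif_pos (Or.inl h)]
  simp [Char.ofNatAux, Char.toNat]

theorem islower_iff (c : Char) : PySem.Chars.islower c = true ↔ 97 ≤ c.toNat ∧ c.toNat ≤ 122 := by
  have h1 : ('a').toNat = 97 := rfl
  have h2 : ('z').toNat = 122 := rfl
  simp [PySem.Chars.islower, char_le_iff, h1, h2]

theorem isupper_iff (c : Char) : PySem.Chars.isupper c = true ↔ 65 ≤ c.toNat ∧ c.toNat ≤ 90 := by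
  have h1 : ('A').toNat = 65 := rfl
  have h2 : ('Z').toNat = 90 := rfl
  simp [PySem.Chars.isupper, char_le_iff, h1, h2]

theorem hex_bridge (c : Char) (h : PySem.Chars.upperChar c = c) :
    ueHexVal? (PySem.Chars.lowerChar c) =
      if bHexDigit c then some (bHexDigitVal c) else none := by
  have hl : ¬ (97 ≤ c.toNat ∧ c.toNat ≤ 122) := by
    intro hx
    rw [PySem.Chars.upperChar, if_pos ((islower_iff c).mpr hx)] at h
    have := congrArg Char.toNat h
    rw [toNat_ofNat_small _ (by omega)] at this
    omega
  rw [PySem.Chars.lowerChar]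
  by_cases hu : PySem.Chars.isupper c = true
  · have hr : 65 ≤ c.toNat ∧ c.toNat ≤ 90 := (isupper_iff c).mp hu
    rw [if_pos hu]
    rw [ueHexVal?, toNat_ofNat_small _ (by omega : c.toNat + 32 < 55296)]
    by_cases h6 : c.toNat ≤ 70
    · rw [if_neg (by omega), if_pos (by omega)]
      rw [bHexDigit, if_pos (by simp; omega), bHexDigitVal, if_neg (by omega)]
      exact congrArg some (by omega)
    · rw [if_neg (by omega), if_neg (by omega), if_neg (by omega),
          bHexDigit, if_neg (by simp; omega)]
  · rw [if_neg hu]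
    have hr : ¬ (65 ≤ c.toNat ∧ c.toNat ≤ 90) := fun hx => hu ((isupper_iff c).mpr hx)
    rw [ueHexVal?]
    by_cases hd : 48 ≤ c.toNat ∧ c.toNat ≤ 57
    · rw [if_pos hd, bHexDigit, if_pos (by simp; omega), bHexDigitVal, if_pos (by omega)]
    · rw [if_neg hd, if_neg (by omega), if_neg (by omega), bHexDigit, if_neg (by simp; omega)]

theorem ueLoop_spec (s : List Char) :
    ∀ (m k : Nat) (res : List Char), k + m = s.length / 4 →
      ueLoop s k res = res ++ (List.range m).flatMap
        (fun j => '\\' :: 'u' ::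
          PySem.Chars.lower
            (PySem.List.slice s (some (4 * ((k + j : Nat) : Int))) (some (4 * ((k + j : Nat) : Int) + 4)))) := by
  intro m
  induction m with
  | zero => intro k res hk; rw [ueLoop]; simp; omega
  | succ m ih =>
      intro k res hk
      rw [ueLoop]
      rw [if_pos (by omega)]
      rw [ih (k+1) _ (by omega)]
      rw [List.range_succ_eq_map]
      simp [List.flatMap_cons, List.append_assoc]
      rw [List.flatMap_map]
      congr 1
      funext j
      have : (↑k + 1 + (j:Int)) = (↑k + ↑(Nat.succ j) : Int) := by push_cast; ring
      simp [this]

theorem ueDecode_flatMap :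
    ∀ L : List (List Char), (∀ ch ∈ L, ch.length = 4) →
      ueDecode (L.flatMap (fun ch => '\\' :: 'u' :: ch)) =
        if L.all (fun ch => ch.all (fun c => (ueHexVal? c).isSome)) then
          some (L.map (fun ch => Char.ofNat (ch.foldl (fun a c => 16 * a + (ueHexVal? c).getD 0) 0)))
        else none := by
  intro L
  induction L with
  | nil => intro _; simp [ueDecode]
  | cons ch L ih =>
      intro hlen
      obtain ⟨a, b, c, d, rfl⟩ : ∃ a b c d, ch = [a, b, c, d] := by
        have h4 := hlen ch (by simp)
        match ch, h4 with
        | [a, b, c, d], _ => exact ⟨a, b, c, d, rfl⟩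
      have hrest : ∀ x ∈ L, x.length = 4 := fun x hx => hlen x (List.mem_cons_of_mem _ hx)
      simp only [List.flatMap_cons, List.cons_append, List.nil_append]
      rw [ueDecode]
      rcases ha : ueHexVal? a with _ | x <;> rcases hb : ueHexVal? b with _ | y <;>
        rcases hc : ueHexVal? c with _ | z <;> rcases hd : ueHexVal? d with _ | w <;>
        simp [ha, hb, hc, hd, ih hrest]
      rw [show 4096 * x + 256 * y + 16 * z + w = 16 * (16 * (16 * x + y) + z) + w from by ring]

theorem map_fix_of_upper {s : List Char} (h : PySem.Chars.upper s = s) :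
    ∀ c ∈ s, PySem.Chars.upperChar c = c := by
  rw [PySem.Chars.upper] at h
  induction s with
  | nil => simp
  | cons a l ih =>
      simp only [List.map_cons, List.cons.injEq] at h
      intro x hx
      rcases List.mem_cons.mp hx with rfl | hx
      · exact h.1
      · exact ih h.2 x hx

theorem lower_all_bridge (ch : List Char) (h : ∀ c ∈ ch, PySem.Chars.upperChar c = c) :
    (PySem.Chars.lower ch).all (fun c => (ueHexVal? c).isSome) = ch.all bHexDigit := by
  induction ch with
  | nil => simp [PySem.Chars.lower]
  | cons a l ih =>
      simp only [PySem.Chars.lower, List.map_cons, List.all_cons] at *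
      rw [hex_bridge a (h a (by simp))]
      rw [ih (fun c hc => h c (by simp [hc]))]
      by_cases hb : bHexDigit a = true <;> simp [hb]

theorem lower_fold_bridge (ch : List Char) (h : ∀ c ∈ ch, PySem.Chars.upperChar c = c)
    (hall : ch.all bHexDigit = true) :
    ∀ acc, (PySem.Chars.lower ch).foldl (fun a c => 16 * a + (ueHexVal? c).getD 0) acc =
      ch.foldl (fun a c => 16 * a + bHexDigitVal c) acc := by
  induction ch with
  | nil => intro acc; simp [PySem.Chars.lower]
  | cons a l ih =>
      intro acc
      simp only [List.all_cons, Bool.and_eq_true] at hall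
      simp only [PySem.Chars.lower, List.map_cons, List.foldl_cons] at *
      rw [hex_bridge a (h a (by simp)), if_pos hall.1]
      exact ih (fun c hc => h c (by simp [hc])) hall.2 _

theorem slice_chunk (s : List Char) (i : Nat) :
    PySem.List.slice s (some (4 * (i : Int))) (some (4 * (i : Int) + 4)) =
      (s.drop (4 * i)).take 4 := by
  have h1 : (4 * (i : Int)) = ((4 * i : Nat) : Int) := by push_cast; ring
  have h2 : (4 * (i : Int) + 4) = ((4 * i : Nat) : Int) + ((4 : Nat) : Int) := by push_cast; ring
  rw [h2, h1, PySem.List.slice_natCast_add]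

theorem chunk_len (s : List Char) (i : Nat) (h4 : s.length % 4 = 0) (hi : i < s.length / 4) :
    ((s.drop (4 * i)).take 4).length = 4 := by
  simp only [List.length_take, List.length_drop]
  omega

-- ===== VERDICT (by name: the statement is the Claim_ definition above) =====
theorem DecodeUnicode_spec : Claim_equal_DecodeUnicode := by
  intro str _ _
  unfold Spec_DecodeUnicode DecodeUnicode DecodeUnicode_alt
  simp only []
  set s := str.toList with hs
  by_cases hg : s.length % 4 = 0 ∧ s.length > 6
  · rw [if_pos hg]
    by_cases hu : PySem.Chars.upper s = s
    · rw [if_pos hu, if_pos ⟨hg.1, hg.2, hu⟩]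
      have hfix := map_fix_of_upper hu
      have hchmem : ∀ (i : Nat), ∀ c ∈ (s.drop (4 * i)).take 4, c ∈ s :=
        fun i c hc => List.mem_of_mem_drop (List.mem_of_mem_take hc)
      rw [ueLoop_spec s (s.length / 4) 0 [] (by omega)]
      simp only [Nat.zero_add, List.nil_append]
      rw [← List.flatMap_map
            (fun j : Nat => PySem.Chars.lower (PySem.List.slice s (some (4 * (j : Int))) (some (4 * (j : Int) + 4))))
            (fun ch => '\\' :: 'u' :: ch)]
      rw [ueDecode_flatMap _ (by
        intro ch hch
        simp only [List.mem_map, List.mem_range] at hch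
        obtain ⟨i, hi, rfl⟩ := hch
        rw [slice_chunk]
        simp only [PySem.Chars.lower, List.length_map]
        exact chunk_len s i hg.1 hi)]
      have hcond : ((List.range (s.length / 4)).map
            (fun j => PySem.Chars.lower (PySem.List.slice s (some (4 * ((j : Nat) : Int))) (some (4 * ((j : Nat) : Int) + 4))))).all
            (fun ch => ch.all (fun c => (ueHexVal? c).isSome)) =
          ((List.range (s.length / 4)).map
            (fun i => PySem.List.slice s (some (4 * ((i : Nat) : Int))) (some (4 * ((i : Nat) : Int) + 4)))).all
            (fun ch => ch.all bHexDigit) := by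
        simp only [List.all_map]
        apply List.all_congr rfl
        intro i
        simp only [Function.comp]
        rw [slice_chunk]
        exact lower_all_bridge _ (fun c hc => hfix c (hchmem i c hc))
      rw [hcond]
      by_cases hall : ((List.range (s.length / 4)).map
            (fun i => PySem.List.slice s (some (4 * ((i : Nat) : Int))) (some (4 * ((i : Nat) : Int) + 4)))).all
            (fun ch => ch.all bHexDigit) = true
      · rw [if_pos hall, if_pos hall]
        simp only [List.all_map, List.all_eq_true, Function.comp] at hall
        change String.ofList _ = _
        apply congrArg
        simp only [List.map_map]
        apply List.map_congr_left
        intro i hi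
        simp only [Function.comp]
        have hchall : ((s.drop (4 * i)).take 4).all bHexDigit = true := by
          apply List.all_eq_true.mpr
          intro c hc
          exact hall i hi c (by rw [slice_chunk]; exact hc)
        rw [slice_chunk]
        congr 1
        rw [lower_fold_bridge _ (fun c hc => hfix c (hchmem i c hc)) hchall 0]
        rfl
      · rw [if_neg hall, if_neg hall]
    · rw [if_neg hu, if_neg (by rintro ⟨-, -, h⟩; exact hu h)]
  · rw [if_neg hg, if_neg (by rintro ⟨h1, h2, -⟩; exact hg ⟨h1, h2⟩)]
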